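-- pv_equiv track=rewrite | github.com/JohnDorsey/PyCellEliminationRun | MarkovTools.py | getEndingIndicesOfGrowingSubSequences
-- ===== SOURCE A (Python) =====
-- def getEndingIndicesOfGrowingSubSequences(inputArr, searchTerm, keepOnlyLongest=True):
--   #search an entire input array, and output all ending indices of matches with any portion of searchTerm which ends at the end of searchTerm. So searching for [2,3,4,5] is the same as searching for [5], and then searching among those matches for places that also match [4,5], and so on. The time complexity is O(total number of matches). This makes it superior to using getStartingIndicesOfSubSequence repeatedly.
--   #the keepOnlyLongest option is useful for avoiding double-counting. With it enabled, a search for "34567" in "1234567" finds only one match of length 5 instead of one match for each length in [1,2,3,4,5].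
--   #the output of this could be made streamable. But there is little use - most of the ways it is used require reversing the order of the items of its output.
--   if len(searchTerm) == 0:
--     return [(0,[])]
--   result = [(0,[]),(1,[])]
--
--   for location in range(len(inputArr)): #populate list of matches with LENGTH OF ONE!
--     if inputArr[location] == searchTerm[-1]:
--       result[-1][1].append(location)
--
--   for currentLength in range(2,len(searchTerm)+1):
--     result.append((currentLength,[]))
--     i = 0
--     while i < len(result[-2][1]):
--       location = result[-2][1][i]
--       if location+1-currentLength < 0: #This test prevents wrapping around to the other end of the inputArr and general chaos. Without this test, the method finds nonexistant matches.
--         i += 1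
--         continue
--       if searchTerm[-currentLength] == inputArr[location+1-currentLength]:
--         result[-1][1].append(location)
--         if keepOnlyLongest:
--           del result[-2][1][i]
--           continue #skip incrementing i, because the items have shifted.
--       i += 1
--     #this is probably slower:
--     """
--     if keepOnlyLongest:
--       ii = 0
--       while ii < len(result[-2][1]):
--         if result[-2][1][ii] in result[-1][1]:
--           assert False, "this loop should have nothing to do!"
--           del result[-2][1][ii]
--         else:
--           ii += 1
--     """
--     if len(result[-1][1]) == 0:
--       break
--   return result
-- ===== SOURCE B (Python) =====
-- def getEndingIndicesOfGrowingSubSequences(inputArr, searchTerm, keepOnlyLongest=True):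
--   # Compute the longest suffix of searchTerm matching at each ending position in
--   # one backwards scan per position, then group positions by that length,
--   # stopping once no match reaches the current length.
--   m = len(searchTerm)
--   if m == 0:
--     return [(0, [])]
--   longest = []
--   for loc in range(len(inputArr)):
--     L = 0
--     while L < m and L <= loc and inputArr[loc - L] == searchTerm[m - 1 - L]:
--       L += 1
--     longest.append(L)
--   def level(length):
--     if keepOnlyLongest:
--       return [loc for loc, L in enumerate(longest) if L == length]
--     return [loc for loc, L in enumerate(longest) if L >= length]
--   result = [(0, []), (1, level(1))]
--   for length in range(2, m + 1):
--     result.append((length, level(length)))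
--     if not any(L >= length for L in longest):
--       break
--   return result
-- ===== Notes on version B (the rewrite author's own statement) =====
-- stated objective: alternative
-- what changed: B computes the longest suffix-of-searchTerm match ending at each position in a single per-position scan and then groups positions by that length level by level, stopping once no match reaches the current length, instead of A's level-by-level refinement that repeatedly rescans and deletes from the previous level's match list in place.
import Mathlib
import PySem

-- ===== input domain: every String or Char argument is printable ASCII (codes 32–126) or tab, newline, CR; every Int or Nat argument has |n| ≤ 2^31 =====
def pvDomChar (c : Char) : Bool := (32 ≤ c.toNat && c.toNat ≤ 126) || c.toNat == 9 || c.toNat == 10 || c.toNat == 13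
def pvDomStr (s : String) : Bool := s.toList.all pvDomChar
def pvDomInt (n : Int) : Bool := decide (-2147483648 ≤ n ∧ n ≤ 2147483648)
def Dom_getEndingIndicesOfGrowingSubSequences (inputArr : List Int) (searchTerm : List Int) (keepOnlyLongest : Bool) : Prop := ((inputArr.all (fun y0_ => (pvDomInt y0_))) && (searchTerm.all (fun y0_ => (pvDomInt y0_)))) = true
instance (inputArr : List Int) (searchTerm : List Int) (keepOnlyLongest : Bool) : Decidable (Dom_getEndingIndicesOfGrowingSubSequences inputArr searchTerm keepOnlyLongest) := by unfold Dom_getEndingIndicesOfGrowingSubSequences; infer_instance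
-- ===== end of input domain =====

-- ===== PORT A =====
-- B computes each position's longest suffix match in one scan and groups positions by
-- that length with a stop-when-none-reach-this-length loop, instead of A's level-by-level
-- refinement with in-place deletions; alternative decomposition, same worst-case cost.

-- A's first loop: collect locations matching searchTerm[-1]
def pvA_level1 (inputArr searchTerm : List Int) : List Int :=
  (PySem.List.pyRange 0 inputArr.length 1).foldl
    (fun acc loc =>
      if (PySem.List.pyGet? inputArr loc).getD 0 = (PySem.List.pyGet? searchTerm (-1)).getD 0
      then acc ++ [loc] else acc) []

-- A's inner while loop over result[-2][1] with index i and in-place del: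
-- `kept` is the already-scanned prefix (indices < i), `rest` the part from i on.
-- pyGet? is always in range here (0 ≤ loc+1-cl, loc < len, 2 ≤ cl ≤ len term); .getD 0 is never the raising case.
def pvA_inner (inputArr searchTerm : List Int) (cl : Int) (keep : Bool) :
    List Int → List Int → List Int → List Int × List Int
  | kept, [], cur => (kept, cur)
  | kept, loc :: rest, cur =>
    if loc + 1 - cl < 0 then
      pvA_inner inputArr searchTerm cl keep (kept ++ [loc]) rest cur
    else if (PySem.List.pyGet? searchTerm (-cl)).getD 0 = (PySem.List.pyGet? inputArr (loc + 1 - cl)).getD 0 then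
      if keep then pvA_inner inputArr searchTerm cl keep kept rest (cur ++ [loc])
      else pvA_inner inputArr searchTerm cl keep (kept ++ [loc]) rest (cur ++ [loc])
    else
      pvA_inner inputArr searchTerm cl keep (kept ++ [loc]) rest cur

-- A's outer for-loop over currentLength in range(2, len+1) with break on empty level;
-- `finished` = result[:-1], `last` = result[-1] (the only entries still mutated).
def pvA_outer (inputArr searchTerm : List Int) (keep : Bool) :
    List Int → List (Int × List Int) → (Int × List Int) → List (Int × List Int)
  | [], finished, last => finished ++ [last]
  | cl :: rest, finished, last =>
    let pc := pvA_inner inputArr searchTerm cl keep [] last.2 []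
    let finished' := finished ++ [(last.1, pc.1)]
    if pc.2 = [] then finished' ++ [(cl, pc.2)]
    else pvA_outer inputArr searchTerm keep rest finished' (cl, pc.2)

def getEndingIndicesOfGrowingSubSequences (inputArr : List Int) (searchTerm : List Int) (keepOnlyLongest : Bool) : List (Int × List Int) :=
  if searchTerm.length = 0 then [(0, [])]
  else
    pvA_outer inputArr searchTerm keepOnlyLongest
      (PySem.List.pyRange 2 ((searchTerm.length : Int) + 1) 1)
      [(0, [])] (1, pvA_level1 inputArr searchTerm)

-- ===== PORT B =====
-- B's inner while loop: longest L with L < m, L ≤ loc, inputArr[loc-L] == searchTerm[m-1-L].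
-- pyGet? is always in range when the guards hold; .getD 0 is never the raising case.
def pvB_longestAt (inputArr searchTerm : List Int) (m loc : Int) (L : Int) : Int :=
  if h : L < m ∧ L ≤ loc ∧
      (PySem.List.pyGet? inputArr (loc - L)).getD 0 = (PySem.List.pyGet? searchTerm (m - 1 - L)).getD 0 then
    pvB_longestAt inputArr searchTerm m loc (L + 1)
  else L
termination_by (m - L).toNat
decreasing_by omega

-- Source B's `level(length)` helper
def pvB_level (longest : List Int) (keep : Bool) (length : Int) : List Int :=
  if keep then
    ((PySem.List.enumerate longest 0).filter (fun p => p.2 = length)).map (fun p => p.1)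
  else
    ((PySem.List.enumerate longest 0).filter (fun p => length ≤ p.2)).map (fun p => p.1)

-- Source B's `for length in range(2, m+1): append level; break when no match reaches length`
def pvB_loop (longest : List Int) (keep : Bool) :
    List Int → List (Int × List Int) → List (Int × List Int)
  | [], acc => acc
  | length :: rest, acc =>
    let acc' := acc ++ [(length, pvB_level longest keep length)]
    if longest.any (fun Lv => decide (length ≤ Lv)) then pvB_loop longest keep rest acc'
    else acc'

def getEndingIndicesOfGrowingSubSequences_alt (inputArr : List Int) (searchTerm : List Int) (keepOnlyLongest : Bool) : List (Int × List Int) :=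
  let m : Int := searchTerm.length
  if m = 0 then [(0, [])]
  else
    let longest := (PySem.List.pyRange 0 inputArr.length 1).map
      (fun loc => pvB_longestAt inputArr searchTerm m loc 0)
    pvB_loop longest keepOnlyLongest (PySem.List.pyRange 2 (m + 1) 1)
      [(0, []), (1, pvB_level longest keepOnlyLongest 1)]

-- ===== PRECONDITION & SPEC =====
def Spec_getEndingIndicesOfGrowingSubSequences (inputArr : List Int) (searchTerm : List Int) (keepOnlyLongest : Bool) (out : List (Int × List Int)) : Prop := out = getEndingIndicesOfGrowingSubSequences_alt inputArr searchTerm keepOnlyLongest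
instance (inputArr : List Int) (searchTerm : List Int) (keepOnlyLongest : Bool) (out : List (Int × List Int)) : Decidable (Spec_getEndingIndicesOfGrowingSubSequences inputArr searchTerm keepOnlyLongest out) := by unfold Spec_getEndingIndicesOfGrowingSubSequences; infer_instance

-- ===== CLAIM (what is proved, stated in full; the proofs are below) =====
def Claim_equal_getEndingIndicesOfGrowingSubSequences : Prop := ∀ (inputArr : List Int) (searchTerm : List Int) (keepOnlyLongest : Bool), Dom_getEndingIndicesOfGrowingSubSequences inputArr searchTerm keepOnlyLongest → Spec_getEndingIndicesOfGrowingSubSequences inputArr searchTerm keepOnlyLongest (getEndingIndicesOfGrowingSubSequences inputArr searchTerm keepOnlyLongest)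

-- ===== LEMMAS AND PROOFS =====

-- the loop condition of B's inner while, as a Prop on the step counter j
def pvCond (inputArr searchTerm : List Int) (m loc j : Int) : Prop :=
  j < m ∧ j ≤ loc ∧
    (PySem.List.pyGet? inputArr (loc - j)).getD 0 = (PySem.List.pyGet? searchTerm (m - 1 - j)).getD 0

theorem longestAt_ge (a t : List Int) (m loc L : Int) : L ≤ pvB_longestAt a t m loc L := by
  fun_induction pvB_longestAt a t m loc L with
  | case1 L h ih => omega
  | case2 L h => omega

theorem longestAt_le (a t : List Int) (m loc L : Int) (hL : L ≤ m) :
    pvB_longestAt a t m loc L ≤ m := by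
  fun_induction pvB_longestAt a t m loc L with
  | case1 L h ih => exact ih (by omega)
  | case2 L h => omega

theorem le_longestAt_iff (a t : List Int) (m loc L : Int) :
    ∀ c, L ≤ c → (c ≤ pvB_longestAt a t m loc L ↔ ∀ j, L ≤ j → j < c → pvCond a t m loc j) := by
  fun_induction pvB_longestAt a t m loc L with
  | case1 L h ih =>
    intro c hc
    by_cases hc' : L + 1 ≤ c
    · rw [ih c hc']
      constructor
      · intro H j h1 h2
        by_cases hj : j = L
        · subst hj; exact h
        · exact H j (by omega) h2
      · intro H j h1 h2
        exact H j (by omega) h2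
    · have hcL : c = L := by omega
      subst hcL
      have h1 : c + 1 ≤ pvB_longestAt a t m loc (c + 1) := longestAt_ge a t m loc (c + 1)
      constructor
      · intro _ j hj1 hj2; omega
      · intro _; omega
  | case2 L h =>
    intro c hc
    constructor
    · intro H j h1 h2
      exfalso; omega
    · intro H
      by_cases hcL : c = L
      · omega
      · exfalso; exact h (H L (by omega) (by omega))

-- proof-side abbreviations: r, the level sets S (matches of length ≥ L) and E (exactly L)
def pvR (a t : List Int) (loc : Int) : Int := pvB_longestAt a t (t.length : Int) loc 0

def pvS (a t : List Int) (L : Int) : List Int :=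
  (PySem.List.pyRange 0 a.length 1).filter (fun loc => decide (L ≤ pvR a t loc))

def pvE (a t : List Int) (L : Int) : List Int :=
  (PySem.List.pyRange 0 a.length 1).filter (fun loc => decide (pvR a t loc = L))

theorem pvR_le (a t : List Int) (loc : Int) : pvR a t loc ≤ (t.length : Int) :=
  longestAt_le a t _ loc 0 (by positivity)

theorem le_pvR_iff (a t : List Int) (loc c : Int) (hc : 0 ≤ c) :
    c ≤ pvR a t loc ↔ ∀ j, 0 ≤ j → j < c → pvCond a t (t.length : Int) loc j :=
  le_longestAt_iff a t _ loc 0 c hc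

theorem pyGet_neg_eq (xs : List Int) (c : Int) (h1 : 1 ≤ c) (h2 : c ≤ (xs.length : Int)) :
    PySem.List.pyGet? xs (-c) = PySem.List.pyGet? xs ((xs.length : Int) - c) := by
  unfold PySem.List.pyGet?
  congr 1
  unfold PySem.List.pyIdx?
  split_ifs <;> first | rfl | omega | (congr 1; omega)

-- the extension test of A's inner loop, as a Bool
def pvExtB (a t : List Int) (cl loc : Int) : Bool :=
  (!decide (loc + 1 - cl < 0)) &&
    decide ((PySem.List.pyGet? t (-cl)).getD 0 = (PySem.List.pyGet? a (loc + 1 - cl)).getD 0)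

theorem ext_iff_cond (a t : List Int) (cl loc : Int) (h2 : 2 ≤ cl) (hm : cl ≤ (t.length : Int)) :
    pvExtB a t cl loc = true ↔ pvCond a t (t.length : Int) loc (cl - 1) := by
  unfold pvExtB pvCond
  rw [pyGet_neg_eq t cl (by omega) hm]
  have e1 : loc + 1 - cl = loc - (cl - 1) := by ring
  have e2 : (t.length : Int) - cl = (t.length : Int) - 1 - (cl - 1) := by ring
  rw [e1, e2]
  simp only [Bool.and_eq_true, Bool.not_eq_true', decide_eq_false_iff_not, decide_eq_true_eq]
  constructor
  · rintro ⟨ha, hb⟩; exact ⟨by omega, by omega, hb.symm⟩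
  · rintro ⟨ha, hb, hc⟩; exact ⟨by omega, hc.symm⟩

theorem inner_eq (a t : List Int) (cl : Int) (keep : Bool) :
    ∀ prev kept cur, pvA_inner a t cl keep kept prev cur =
      (kept ++ (if keep then prev.filter (fun loc => !pvExtB a t cl loc) else prev),
       cur ++ prev.filter (fun loc => pvExtB a t cl loc)) := by
  intro prev
  induction prev with
  | nil => intro kept cur; simp [pvA_inner]
  | cons loc rest ih =>
    intro kept cur
    by_cases hneg : loc + 1 - cl < 0
    · have hext : pvExtB a t cl loc = false := by unfold pvExtB; simp [hneg]
      rw [pvA_inner, if_pos hneg, ih]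
      cases keep <;> simp [hext]
    · by_cases heq : (PySem.List.pyGet? t (-cl)).getD 0 = (PySem.List.pyGet? a (loc + 1 - cl)).getD 0
      · have hext : pvExtB a t cl loc = true := by unfold pvExtB; simp [hneg, heq]
        rw [pvA_inner, if_neg hneg, if_pos heq]
        cases keep with
        | true => rw [if_pos rfl, ih]; simp [hext]
        | false => rw [if_neg (by simp), ih]; simp [hext]
      · have hext : pvExtB a t cl loc = false := by unfold pvExtB; simp [heq]
        rw [pvA_inner, if_neg hneg, if_neg heq, ih]
        cases keep <;> simp [hext]

theorem level1_eq (a t : List Int) (hm : 1 ≤ (t.length : Int)) :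
    pvA_level1 a t = pvS a t 1 := by
  unfold pvA_level1 pvS
  rw [PySem.List.foldl_append_ite_eq_filter]
  rw [List.nil_append]
  apply List.filter_congr
  intro loc hloc
  have hrange := (PySem.List.mem_pyRange_one).1 hloc
  have hcond : ((PySem.List.pyGet? a loc).getD 0 = (PySem.List.pyGet? t (-1)).getD 0)
      ↔ 1 ≤ pvR a t loc := by
    rw [le_pvR_iff a t loc 1 (by omega)]
    rw [pyGet_neg_eq t 1 (by omega) hm]
    constructor
    · intro h j h1 h2
      have hj : j = 0 := by omega
      subst hj
      refine ⟨by omega, by omega, ?_⟩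
      simpa using h
    · intro h
      have := h 0 (by omega) (by omega)
      unfold pvCond at this
      obtain ⟨_, _, h3⟩ := this
      simpa using h3
  simp only [hcond]

theorem filter_S_ext (a t : List Int) (cl : Int) (h2 : 2 ≤ cl) (hm : cl ≤ (t.length : Int)) :
    (pvS a t (cl - 1)).filter (fun loc => pvExtB a t cl loc) = pvS a t cl := by
  unfold pvS
  rw [List.filter_filter]
  apply List.filter_congr
  intro loc hloc
  have hrange := (PySem.List.mem_pyRange_one).1 hloc
  have key : ((cl - 1 ≤ pvR a t loc) ∧ pvExtB a t cl loc = true) ↔ cl ≤ pvR a t loc := by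
    rw [ext_iff_cond a t cl loc h2 hm, le_pvR_iff a t loc (cl - 1) (by omega),
      le_pvR_iff a t loc cl (by omega)]
    constructor
    · rintro ⟨hall, hlast⟩ j h1 hj
      by_cases hjl : j = cl - 1
      · subst hjl; exact hlast
      · exact hall j h1 (by omega)
    · intro hall
      exact ⟨fun j h1 hj => hall j h1 (by omega), hall (cl - 1) (by omega) (by omega)⟩
  rw [Bool.eq_iff_iff]
  simp only [Bool.and_eq_true, decide_eq_true_eq]
  constructor
  · rintro ⟨h1, h2'⟩; exact key.1 ⟨h2', h1⟩
  · intro h; exact ⟨(key.2 h).2, (key.2 h).1⟩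

theorem filter_S_not_ext (a t : List Int) (cl : Int) (h2 : 2 ≤ cl) (hm : cl ≤ (t.length : Int)) :
    (pvS a t (cl - 1)).filter (fun loc => !pvExtB a t cl loc) = pvE a t (cl - 1) := by
  unfold pvS pvE
  rw [List.filter_filter]
  apply List.filter_congr
  intro loc hloc
  have hrange := (PySem.List.mem_pyRange_one).1 hloc
  have key : ((cl - 1 ≤ pvR a t loc) ∧ pvExtB a t cl loc = false) ↔ pvR a t loc = cl - 1 := by
    have hstep : ((cl - 1 ≤ pvR a t loc) ∧ pvExtB a t cl loc = true) ↔ cl ≤ pvR a t loc := by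
      rw [ext_iff_cond a t cl loc h2 hm, le_pvR_iff a t loc (cl - 1) (by omega),
        le_pvR_iff a t loc cl (by omega)]
      constructor
      · rintro ⟨hall, hlast⟩ j h1 hj
        by_cases hjl : j = cl - 1
        · subst hjl; exact hlast
        · exact hall j h1 (by omega)
      · intro hall
        exact ⟨fun j h1 hj => hall j h1 (by omega), hall (cl - 1) (by omega) (by omega)⟩
    constructor
    · rintro ⟨hge, hnext⟩
      by_contra hne
      have : cl ≤ pvR a t loc := by
        by_contra hlt
        exact hne (by omega)
      have := (hstep.2 this).2
      simp [this] at hnext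
    · intro heq
      refine ⟨by omega, ?_⟩
      rw [Bool.eq_false_iff]
      intro hx
      have := hstep.1 ⟨by omega, hx⟩
      omega
  rw [Bool.eq_iff_iff]
  simp only [Bool.and_eq_true, Bool.not_eq_true', decide_eq_true_eq]
  constructor
  · rintro ⟨h1, h2'⟩; exact key.1 ⟨h2', h1⟩
  · intro h; exact ⟨(key.2 h).2, (key.2 h).1⟩

-- foldl max characterisations
theorem foldl_max_le_iff (l : List Int) : ∀ (acc x : Int), l.foldl max acc ≤ x ↔ acc ≤ x ∧ ∀ y ∈ l, y ≤ x := by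
  induction l with
  | nil => intro acc x; simp
  | cons z zs ih =>
    intro acc x
    simp only [List.foldl_cons, ih, max_le_iff, List.mem_cons]
    constructor
    · rintro ⟨⟨h1, h2⟩, h3⟩; exact ⟨h1, fun y hy => by rcases hy with rfl | hy; exact h2; exact h3 y hy⟩
    · rintro ⟨h1, h2⟩
      exact ⟨⟨h1, h2 z (Or.inl rfl)⟩, fun y hy => h2 y (Or.inr hy)⟩

theorem le_foldl_max_iff (l : List Int) : ∀ (acc x : Int), x ≤ l.foldl max acc ↔ x ≤ acc ∨ ∃ y ∈ l, x ≤ y := by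
  induction l with
  | nil => intro acc x; simp
  | cons z zs ih =>
    intro acc x
    simp only [List.foldl_cons, ih, le_max_iff, List.mem_cons]
    constructor
    · rintro (⟨h1 | h2⟩ | ⟨y, hy, h3⟩)
      · exact Or.inl h1
      · exact Or.inr ⟨z, Or.inl rfl, h2⟩
      · exact Or.inr ⟨y, Or.inr hy, h3⟩
    · rintro (h1 | ⟨y, rfl | hy, h3⟩)
      · exact Or.inl (Or.inl h1)
      · exact Or.inl (Or.inr h3)
      · exact Or.inr ⟨y, hy, h3⟩

-- proof-side quantities: the largest match length present, and the last level A/B emit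
def pvMaxf (a t : List Int) : Int :=
  ((PySem.List.pyRange 0 a.length 1).map (fun loc => pvB_longestAt a t (t.length : Int) loc 0)).foldl max 0

def pvK (a t : List Int) : Int := min (t.length : Int) (max (pvMaxf a t + 1) 2)

theorem maxf_le (a t : List Int) : pvMaxf a t ≤ (t.length : Int) := by
  unfold pvMaxf
  rw [foldl_max_le_iff]
  refine ⟨by positivity, ?_⟩
  intro y hy
  simp only [List.mem_map] at hy
  obtain ⟨loc, _, rfl⟩ := hy
  exact pvR_le a t loc

theorem S_ne_nil_iff (a t : List Int) (L : Int) (hL : 1 ≤ L) :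
    pvS a t L ≠ [] ↔ L ≤ pvMaxf a t := by
  unfold pvS pvMaxf
  rw [le_foldl_max_iff]
  rw [Ne, List.filter_eq_nil_iff]
  push Not
  constructor
  · rintro ⟨loc, hloc, hd⟩
    simp only [decide_eq_true_eq] at hd
    exact Or.inr ⟨pvB_longestAt a t (t.length : Int) loc 0, List.mem_map_of_mem hloc, hd⟩
  · rintro (h | ⟨y, hy, hle⟩)
    · omega
    · simp only [List.mem_map] at hy
      obtain ⟨loc, hloc, rfl⟩ := hy
      exact ⟨loc, hloc, by simpa using hle⟩

theorem E_subset_S (a t : List Int) (L : Int) (h : pvS a t L = []) : pvE a t L = [] := by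
  unfold pvS at h
  unfold pvE
  rw [List.filter_eq_nil_iff] at h ⊢
  intro loc hloc hd
  simp only [decide_eq_true_eq] at hd
  exact h loc hloc (by simp [hd])

theorem E_eq_S_top (a t : List Int) : pvE a t (t.length : Int) = pvS a t (t.length : Int) := by
  unfold pvE pvS
  apply List.filter_congr
  intro loc _
  have := pvR_le a t loc
  rw [Bool.eq_iff_iff]
  simp only [decide_eq_true_eq]
  constructor
  · intro h; omega
  · intro h; omega

-- the canonical level content
def pvLvl (a t : List Int) (keep : Bool) (L : Int) : List Int :=
  if keep then pvE a t L else pvS a t L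

theorem outer_eq (a t : List Int) (keep : Bool) (hm : 1 ≤ (t.length : Int)) :
    ∀ (k : Nat) (c : Int), ((t.length : Int) + 1 - c).toNat = k → 2 ≤ c → c ≤ (t.length : Int) + 1 →
    (c = 2 ∨ pvS a t (c - 1) ≠ []) →
    ∀ fin, pvA_outer a t keep (PySem.List.pyRange c ((t.length : Int) + 1) 1) fin (c - 1, pvS a t (c - 1)) =
      fin ++ (PySem.List.pyRange (c - 1) (pvK a t + 1) 1).map (fun L => (L, pvLvl a t keep L)) := by
  intro k
  induction k using Nat.strong_induction_on with
  | _ k ih =>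
    intro c hk h2 hle hne fin
    by_cases hcm : c = (t.length : Int) + 1
    -- base case: the range is empty, return finished ++ [last]
    · subst hcm
      rw [PySem.List.pyRange_one_eq_nil (by omega), pvA_outer]
      have hKm : pvK a t = (t.length : Int) := by
        by_cases hm1 : (t.length : Int) = 1
        · unfold pvK; omega
        · have hSm : pvS a t ((t.length : Int) + 1 - 1) ≠ [] := by
            rcases hne with h | h
            · exfalso; omega
            · exact h
          have : (t.length : Int) ≤ pvMaxf a t := by
            rw [← S_ne_nil_iff a t _ (by omega)]
            simpa using hSm
          have := maxf_le a t
          unfold pvK; omega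
      have hrange : PySem.List.pyRange ((t.length : Int) + 1 - 1) (pvK a t + 1) 1 = [(t.length : Int)] := by
        rw [hKm]
        have : (t.length : Int) + 1 - 1 = (t.length : Int) := by ring
        rw [this, PySem.List.pyRange_one_singleton]
      have e1 : (t.length : Int) + 1 - 1 = (t.length : Int) := by ring
      rw [hrange, e1]
      simp only [List.map_cons, List.map_nil]
      congr 3
      unfold pvLvl
      cases keep with
      | true => exact (E_eq_S_top a t).symm
      | false => rfl
    -- step case: process currentLength = c
    · have hclt : c < (t.length : Int) + 1 := by omega
      rw [PySem.List.pyRange_one_cons (by omega), pvA_outer]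
      rw [inner_eq]
      simp only [List.nil_append]
      rw [filter_S_ext a t c h2 (by omega)]
      by_cases hSc : pvS a t c = []
      · rw [if_pos hSc]
        have hKc : pvK a t = c := by
          have hub : pvMaxf a t ≤ c - 1 := by
            by_contra hx
            exact (S_ne_nil_iff a t c (by omega)).2 (by omega) hSc
          have hlb : c - 1 ≤ pvMaxf a t ∨ c = 2 := by
            rcases hne with h | h
            · exact Or.inr h
            · exact Or.inl ((S_ne_nil_iff a t (c - 1) (by omega)).1 h)
          unfold pvK
          rcases hlb with h | h <;> omega
        have hrange : PySem.List.pyRange (c - 1) (pvK a t + 1) 1 = [c - 1, c] := by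
          rw [hKc, PySem.List.pyRange_one_cons (by omega)]
          have : c - 1 + 1 = c := by ring
          rw [this, PySem.List.pyRange_one_singleton]
        rw [hrange]
        simp only [List.map_cons, List.map_nil, List.append_assoc, List.cons_append, List.nil_append]
        congr 2
        · unfold pvLvl
          cases keep with
          | true => simp [filter_S_not_ext a t c h2 (by omega)]
          | false => simp
        · unfold pvLvl
          cases keep with
          | true => simp [E_subset_S a t c hSc, hSc]
          | false => simp [hSc]
      · rw [if_neg hSc]
        have hmaxc : c ≤ pvMaxf a t := (S_ne_nil_iff a t c (by omega)).1 hSc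
        have hstep := ih ((t.length : Int) + 1 - (c + 1)).toNat (by omega) (c + 1) rfl (by omega)
          (by omega) (Or.inr (by simpa using hSc))
        have harg : c + 1 - 1 = c := by ring
        rw [harg] at hstep
        rw [hstep]
        have hcK : c - 1 < pvK a t := by
          unfold pvK
          have := maxf_le a t
          omega
        rw [PySem.List.pyRange_one_cons (show c - 1 < pvK a t + 1 by omega)]
        have : c - 1 + 1 = c := by ring
        rw [this]
        simp only [List.map_cons, List.append_assoc, List.cons_append, List.nil_append]
        congr 2
        unfold pvLvl
        cases keep with
        | true => simp [filter_S_not_ext a t c h2 (by omega)]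
        | false => simp

-- B's `longest` list, named for the proofs
def pvLongest (a t : List Int) : List Int :=
  (PySem.List.pyRange 0 a.length 1).map (fun loc => pvB_longestAt a t (t.length : Int) loc 0)

theorem enumerate_longest (a t : List Int) :
    PySem.List.enumerate (pvLongest a t) 0 =
      (PySem.List.pyRange 0 a.length 1).map (fun j => (j, pvR a t j)) := by
  unfold pvLongest
  have hlen : PySem.List.len ((PySem.List.pyRange 0 (a.length : Int) 1).map
      (fun loc => pvB_longestAt a t (t.length : Int) loc 0)) = (a.length : Int) := by
    unfold PySem.List.len
    rw [List.length_map, PySem.List.length_pyRange_one]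
    omega
  rw [PySem.List.enumerate_eq_map_pyRange (d := 0), hlen]
  apply List.map_congr_left
  intro j hj
  have hjr := (PySem.List.mem_pyRange_one).1 hj
  congr 1
  rw [PySem.List.pyGetD_map_pyRange_of_nonneg _ _ _ _ (by omega) (by omega)]
  rfl

-- B's level(length) is exactly the canonical level content
theorem level_eq (a t : List Int) (keep : Bool) (L : Int) :
    pvB_level (pvLongest a t) keep L = pvLvl a t keep L := by
  unfold pvB_level pvLvl
  rw [enumerate_longest]
  cases keep with
  | true => simp [List.filter_map, List.map_map, pvE, Function.comp_def]
  | false => simp [List.filter_map, List.map_map, pvS, Function.comp_def]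

-- B's break test: some position's longest match reaches L  ⟺  level set S(L) is nonempty
theorem any_iff (a t : List Int) (L : Int) :
    (pvLongest a t).any (fun Lv => decide (L ≤ Lv)) = true ↔ pvS a t L ≠ [] := by
  unfold pvLongest pvS
  rw [List.any_eq_true, Ne, List.filter_eq_nil_iff]
  push Not
  constructor
  · rintro ⟨x, hx, hd⟩
    simp only [List.mem_map] at hx
    obtain ⟨loc, hloc, rfl⟩ := hx
    exact ⟨loc, hloc, hd⟩
  · rintro ⟨loc, hloc, hd⟩
    exact ⟨pvB_longestAt a t (t.length : Int) loc 0, List.mem_map_of_mem hloc, hd⟩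

theorem bloop_eq (a t : List Int) (keep : Bool) (hm : 1 ≤ (t.length : Int)) :
    ∀ (k : Nat) (c : Int), ((t.length : Int) + 1 - c).toNat = k → 2 ≤ c → c ≤ (t.length : Int) + 1 →
    (c = 2 ∨ pvS a t (c - 1) ≠ []) →
    ∀ acc, pvB_loop (pvLongest a t) keep (PySem.List.pyRange c ((t.length : Int) + 1) 1) acc =
      acc ++ (PySem.List.pyRange c (pvK a t + 1) 1).map (fun L => (L, pvLvl a t keep L)) := by
  intro k
  induction k using Nat.strong_induction_on with
  | _ k ih =>
    intro c hk h2 hle hne acc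
    by_cases hcm : c = (t.length : Int) + 1
    · subst hcm
      rw [PySem.List.pyRange_one_eq_nil (by omega), pvB_loop]
      have hK : pvK a t ≤ (t.length : Int) := by unfold pvK; omega
      rw [PySem.List.pyRange_one_eq_nil (by omega)]
      simp
    · have hclt : c < (t.length : Int) + 1 := by omega
      rw [PySem.List.pyRange_one_cons (by omega), pvB_loop]
      by_cases hSc : pvS a t c = []
      · have hany : (pvLongest a t).any (fun Lv => decide (c ≤ Lv)) = false := by
          rw [Bool.eq_false_iff, Ne, any_iff]
          simpa using hSc
        rw [hany, if_neg (by simp)]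
        have hKc : pvK a t = c := by
          have hub : pvMaxf a t ≤ c - 1 := by
            by_contra hx
            exact (S_ne_nil_iff a t c (by omega)).2 (by omega) hSc
          have hlb : c - 1 ≤ pvMaxf a t ∨ c = 2 := by
            rcases hne with h | h
            · exact Or.inr h
            · exact Or.inl ((S_ne_nil_iff a t (c - 1) (by omega)).1 h)
          unfold pvK
          rcases hlb with h | h <;> omega
        rw [hKc, PySem.List.pyRange_one_singleton]
        simp [level_eq]
      · have hany : (pvLongest a t).any (fun Lv => decide (c ≤ Lv)) = true := by
          rw [any_iff]; exact hSc
        rw [hany, if_pos rfl]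
        have hmaxc : c ≤ pvMaxf a t := (S_ne_nil_iff a t c (by omega)).1 hSc
        have hstep := ih ((t.length : Int) + 1 - (c + 1)).toNat (by omega) (c + 1) rfl (by omega)
          (by omega) (Or.inr (by simpa using hSc))
        rw [hstep]
        have hcK : c < pvK a t + 1 := by
          unfold pvK
          have := maxf_le a t
          omega
        rw [PySem.List.pyRange_one_cons hcK]
        simp [level_eq, List.append_assoc]

-- ===== VERDICT (by name: the statement is the Claim_ definition above) =====
theorem getEndingIndicesOfGrowingSubSequences_spec : Claim_equal_getEndingIndicesOfGrowingSubSequences := by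
  intro a t keep _
  unfold Spec_getEndingIndicesOfGrowingSubSequences
  by_cases hm : t.length = 0
  · unfold getEndingIndicesOfGrowingSubSequences getEndingIndicesOfGrowingSubSequences_alt
    rw [if_pos hm, if_pos (by exact_mod_cast hm)]
  · have hm1 : 1 ≤ (t.length : Int) := by omega
    unfold getEndingIndicesOfGrowingSubSequences
    rw [if_neg hm]
    rw [level1_eq a t hm1]
    have hA := outer_eq a t keep hm1 ((t.length : Int) + 1 - 2).toNat 2 rfl (by omega) (by omega)
      (Or.inl rfl) [(0, [])]
    have h2 : (2 : Int) - 1 = 1 := by norm_num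
    rw [h2] at hA
    rw [hA]
    have halt : getEndingIndicesOfGrowingSubSequences_alt a t keep =
        pvB_loop (pvLongest a t) keep (PySem.List.pyRange 2 ((t.length : Int) + 1) 1)
          [(0, []), (1, pvB_level (pvLongest a t) keep 1)] := by
      unfold getEndingIndicesOfGrowingSubSequences_alt pvLongest
      rw [if_neg (by omega)]
    rw [halt]
    have hB := bloop_eq a t keep hm1 ((t.length : Int) + 1 - 2).toNat 2 rfl (by omega) (by omega)
      (Or.inl rfl) [(0, []), (1, pvB_level (pvLongest a t) keep 1)]
    rw [hB]
    have h1K : (1 : Int) < pvK a t + 1 := by unfold pvK; omega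
    rw [PySem.List.pyRange_one_cons h1K]
    simp [level_eq]
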